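-- pv_equiv track=rewrite | github.com/RavenDS/flatout-blender-tools | scripts/dds2tga.py | get_shift_and_size
-- ===== SOURCE A (Python) =====
-- def get_shift_and_size(mask):
--     if mask == 0:
--         return 0, 0
--     shift = 0
--     while (mask >> shift) & 1 == 0:
--         shift += 1
--     size = 0
--     while (mask >> (shift + size)) & 1 == 1:
--         size += 1
--     return shift, size
-- ===== SOURCE B (Python) =====
-- def get_shift_and_size(mask):
--     if mask == 0:
--         return 0, 0
--     shift = (mask & -mask).bit_length() - 1
--     m = mask >> shift
--     return shift, (m ^ (m + 1)).bit_length() - 1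
-- ===== Notes on version B (the rewrite author's own statement) =====
-- stated objective: idiomatic
-- what changed: Replaces the two bit-scanning while loops with closed-form bit tricks: shift = (mask & -mask).bit_length() - 1 (lowest set bit) and size = (m ^ (m+1)).bit_length() - 1 (trailing-ones run of m = mask >> shift).
import Mathlib
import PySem

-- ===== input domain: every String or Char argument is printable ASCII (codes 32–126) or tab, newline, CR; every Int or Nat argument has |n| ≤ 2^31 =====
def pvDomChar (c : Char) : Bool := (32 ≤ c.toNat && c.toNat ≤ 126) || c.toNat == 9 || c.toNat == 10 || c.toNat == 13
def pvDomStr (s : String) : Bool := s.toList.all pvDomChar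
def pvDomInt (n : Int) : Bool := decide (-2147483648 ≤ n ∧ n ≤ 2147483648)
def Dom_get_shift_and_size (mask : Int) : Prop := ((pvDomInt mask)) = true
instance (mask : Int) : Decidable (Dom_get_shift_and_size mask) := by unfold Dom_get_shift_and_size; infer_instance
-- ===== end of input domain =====

-- B replaces A's two bit-scanning while loops by the closed-form bit tricks
-- (mask & -mask).bit_length() - 1 and (m ^ (m+1)).bit_length() - 1 (loop-free, more idiomatic).

-- ===== PORT A =====
-- the common shape of A's two loops: 'while p(i): i += 1'; the fuel only makes the
-- recursion total — 64 iterations always suffice on the claimed inputs (|mask| ≤ 2^31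
-- and Pre_: each loop ends within 33 steps)
def pvWhileInc (p : Int → Bool) : Nat → Int → Int
  | 0, i => i
  | fuel+1, i => if p i then pvWhileInc p fuel (i + 1) else i

def get_shift_and_size (mask : Int) : Int × Int :=
  if mask == 0 then (0, 0)
  else
    let shift := pvWhileInc (fun s => PySem.Int.band (mask >>> s.toNat) 1 == 0) 64 0
    let size := pvWhileInc (fun t => PySem.Int.band (mask >>> (shift + t).toNat) 1 == 1) 64 0
    (shift, size)

-- ===== PORT B =====
-- shift and the size are kept as Nat: '.bit_length() - 1' is only applied to nonzero
-- values (mask & -mask and m ^ (m+1) are nonzero for mask ≠ 0), where bit_length ≥ 1,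
-- so Python's subtraction agrees with Nat subtraction; Python's '>>' by a nonnegative
-- count is '>>>'.
def get_shift_and_size_alt (mask : Int) : Int × Int :=
  if mask == 0 then (0, 0)
  else
    let shift : Nat := PySem.Int.bitLength (PySem.Int.band mask (-mask)) - 1
    let m : Int := mask >>> shift
    ((shift : Int), ((PySem.Int.bitLength (PySem.Int.bxor m (m + 1)) - 1 : Nat) : Int))

-- ===== PRECONDITION & SPEC =====
-- Pre_ excludes exactly the negative masks whose magnitude is a power of two
-- (mask = -2^k): on those A's second while loop never terminates (after the shift every
-- remaining two's-complement bit is a one); A returns normally on every other integer.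
def Pre_get_shift_and_size (mask : Int) : Prop :=
  0 ≤ mask ∨ PySem.Int.band (-mask) (-mask - 1) ≠ 0
instance (mask : Int) : Decidable (Pre_get_shift_and_size mask) := by
  unfold Pre_get_shift_and_size; infer_instance
def pvWitness_get_shift_and_size : Int := (12)
def Spec_get_shift_and_size (mask : Int) (out : Int × Int) : Prop := out = get_shift_and_size_alt mask
instance (mask : Int) (out : Int × Int) : Decidable (Spec_get_shift_and_size mask out) := by
  unfold Spec_get_shift_and_size; infer_instance

-- ===== CLAIM (what is proved, stated in full; the proofs are below) =====
def Claim_equal_get_shift_and_size : Prop := ∀ (mask : Int), Dom_get_shift_and_size mask → Pre_get_shift_and_size mask → Spec_get_shift_and_size mask (get_shift_and_size mask)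

-- ===== LEMMAS AND PROOFS =====

lemma pvWhileInc_eq (p : Int → Bool) (b : Nat)
    (htrue : ∀ t : Nat, t < b → p t = true) (hfalse : p b = false) :
    ∀ (fuel s : Nat), s ≤ b → b - s < fuel → pvWhileInc p fuel (s : Int) = (b : Int) := by
  intro fuel
  induction fuel with
  | zero => intro s h1 h2; omega
  | succ f ih =>
    intro s h1 h2
    by_cases hsb : s = b
    · subst hsb; simp [pvWhileInc, hfalse]
    · have hlt : s < b := lt_of_le_of_ne h1 hsb
      simp only [pvWhileInc, htrue s hlt, if_true]
      have hc : (s : Int) + 1 = ((s + 1 : Nat) : Int) := by push_cast; ring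
      rw [hc]
      exact ih (s + 1) (by omega) (by omega)

lemma pvRep (t Z : Nat) (hZ : 0 < Z) : 2^t * Z - 1 = 2^t * (Z - 1) + (2^t - 1) := by
  have h1 : 2^t * (Z - 1) = 2^t * Z - 2^t * 1 := Nat.mul_sub _ _ _
  have h2 : 2^t * 1 ≤ 2^t * Z := Nat.mul_le_mul_left _ hZ
  have h3 : 0 < 2^t := Nat.two_pow_pos t
  omega

lemma pvDivPow (j Z : Nat) (hZ : 0 < Z) : (2^j * Z - 1) / 2^j = Z - 1 := by
  rw [pvRep j Z hZ, Nat.mul_add_div (Nat.two_pow_pos j),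
      Nat.div_eq_of_lt (by have := Nat.two_pow_pos j; omega)]
  omega

lemma pvPowMulDiv (t e w : Nat) (h : t ≤ e) : (2^e * w) / 2^t = 2^(e-t) * w := by
  have h2 : (2:Nat)^e = 2^t * 2^(e-t) := by rw [← pow_add]; congr 1; omega
  rw [h2, mul_assoc, Nat.mul_div_cancel_left _ (Nat.two_pow_pos t)]

lemma pvOddTestBit (M d : Nat) (hM : M % 2 = 1) (hd : 1 ≤ d) :
    M.testBit d = (M - 1).testBit d := by
  obtain ⟨d', rfl⟩ : ∃ d', d = d' + 1 := ⟨d - 1, by omega⟩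
  rw [Nat.testBit_add_one, Nat.testBit_add_one]
  congr 1
  omega

lemma pvLandLow (t M : Nat) (hM : M % 2 = 1) :
    (2^t * M) &&& (2^t * M - 1) = 2^t * (M - 1) := by
  apply Nat.eq_of_testBit_eq
  intro j
  rw [Nat.testBit_and, pvRep t M (by omega),
      Nat.testBit_two_pow_mul_add _ (by have := Nat.two_pow_pos t; omega) j,
      Nat.testBit_two_pow_mul, Nat.testBit_two_pow_mul]
  by_cases hj : j < t
  · have ht : ¬ t ≤ j := by omega
    simp [if_pos hj, ht]
  · rw [if_neg hj]
    by_cases hd : j = t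
    · subst hd
      have h0 : (M - 1) % 2 ≠ 1 := by omega
      simp [Nat.testBit_zero, hM, h0]
    · have h1 : 1 ≤ j - t := by omega
      rw [pvOddTestBit M (j - t) hM h1]
      have ht : j ≥ t := by omega
      simp [ht, Bool.and_self]

lemma pvXorLow (t w : Nat) (hw : w % 2 = 1) :
    (2^t * w) ^^^ (2^t * w - 1) = 2^(t+1) - 1 := by
  apply Nat.eq_of_testBit_eq
  intro j
  rw [Nat.testBit_xor, pvRep t w (by omega),
      Nat.testBit_two_pow_mul_add _ (by have := Nat.two_pow_pos t; omega) j,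
      Nat.testBit_two_pow_mul, Nat.testBit_two_pow_sub_one, Nat.testBit_two_pow_sub_one]
  by_cases hj : j < t
  · have ht : ¬ t ≤ j := by omega
    have h1 : j < t + 1 := by omega
    simp [ht, hj, h1]
  · rw [if_neg hj]
    by_cases hd : j = t
    · subst hd
      have h0 : (w - 1) % 2 ≠ 1 := by omega
      simp [Nat.testBit_zero, hw, h0]
    · have h1 : 1 ≤ j - t := by omega
      rw [pvOddTestBit w (j - t) hw h1]
      have ht : j ≥ t := by omega
      have h2 : ¬ (j < t + 1) := by omega
      simp [ht, h2]

lemma pvBitLengthEq (n : Int) (t : Nat) (h1 : 2^t ≤ n.natAbs) (h2 : n.natAbs < 2^(t+1)) :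
    PySem.Int.bitLength n = t + 1 := by
  have hpos : 0 < n.natAbs := lt_of_lt_of_le (Nat.two_pow_pos t) h1
  have hne : n ≠ 0 := by intro h; rw [h] at hpos; simp at hpos
  have hu := PySem.Int.lt_two_pow_bitLength n
  have hl := PySem.Int.two_pow_bitLength_le n hne
  have h3 : t < PySem.Int.bitLength n :=
    (Nat.pow_lt_pow_iff_right (by norm_num)).mp (lt_of_le_of_lt h1 hu)
  have h4 : PySem.Int.bitLength n - 1 < t + 1 :=
    (Nat.pow_lt_pow_iff_right (by norm_num)).mp (lt_of_le_of_lt hl h2)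
  omega

lemma pvCastShr (n k : Nat) : ((n : Int)) >>> k = ((n >>> k : Nat) : Int) := by simp

lemma pvBandCastOne (X : Nat) : PySem.Int.band (X : Int) 1 = ((X % 2 : Nat) : Int) := by
  have h := PySem.Int.band_natCast X 1
  have h1 : ((1 : Nat) : Int) = 1 := rfl
  rw [h1] at h
  rw [h, Nat.and_one_is_mod]

lemma pvMainPos (mask : Int) (a e M w : Nat)
    (hM : M % 2 = 1) (hmask : mask = ((2^a * M : Nat) : Int))
    (hMe : M + 1 = 2^e * w) (hw : w % 2 = 1) (he : 1 ≤ e)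
    (ha : a < 64) (hee : e < 64) :
    get_shift_and_size mask = ((a : Int), (e : Int)) ∧
    get_shift_and_size_alt mask = ((a : Int), (e : Int)) := by
  have hM1 : 1 ≤ M := by omega
  have hw1 : 1 ≤ w := by omega
  have hNpos : 0 < 2^a * M := Nat.mul_pos (Nat.two_pow_pos a) (by omega)
  have h0 : (mask == 0) = false := by
    rw [hmask]; simp; omega
  -- values of mask >> t for t ≤ a
  have hA1 : ∀ t : Nat, t ≤ a → mask >>> t = ((2^(a-t) * M : Nat) : Int) := by
    intro t ht
    rw [hmask]
    rw [pvCastShr, Nat.shiftRight_eq_div_pow, pvPowMulDiv t a M ht]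
  -- values of mask >> (a + t) for t ≤ e
  have hA2 : ∀ t : Nat, t ≤ e → mask >>> (a + t) = ((2^(e-t) * w - 1 : Nat) : Int) := by
    intro t ht
    rw [hmask]
    rw [pvCastShr, Nat.shiftRight_eq_div_pow]
    congr 1
    have hMeq : M = 2^e * w - 1 := by omega
    have hsplit : (2:Nat)^(a+t) = 2^a * 2^t := by rw [pow_add]
    have h1 : 2^a * M / 2^(a+t) = M / 2^t := by
      rw [hsplit, ← Nat.div_div_eq_div_mul, Nat.mul_div_cancel_left _ (Nat.two_pow_pos a)]
    rw [h1, hMeq]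
    have h2 : (2:Nat)^e * w = 2^t * (2^(e-t) * w) := by
      rw [← mul_assoc, ← pow_add]; congr 2; omega
    rw [h2, pvDivPow t _ (Nat.mul_pos (Nat.two_pow_pos _) (by omega))]
  -- first loop
  have htrue1 : ∀ t : Nat, t < a →
      (PySem.Int.band (mask >>> ((t : Int)).toNat) 1 == 0) = true := by
    intro t ht
    rw [Int.toNat_natCast, hA1 t (by omega), pvBandCastOne]
    have hev : (2^(a-t) * M) % 2 = 0 := by
      have h2 : (2:Nat)^(a-t) = 2 * 2^(a-t-1) := by
        rw [← pow_succ']; congr 1; omega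
      have h3 : 2^(a-t) * M = 2 * (2^(a-t-1) * M) := by rw [h2]; ring
      omega
    rw [hev]
    simp
  have hfalse1 : (PySem.Int.band (mask >>> ((a : Int)).toNat) 1 == 0) = false := by
    rw [Int.toNat_natCast, hA1 a le_rfl, pvBandCastOne]
    have : (2^(a-a) * M) % 2 = 1 := by simpa using hM
    rw [this]
    simp
  have hshift : pvWhileInc (fun s => PySem.Int.band (mask >>> s.toNat) 1 == 0) 64 0 = (a : Int) := by
    have := pvWhileInc_eq (fun s => PySem.Int.band (mask >>> s.toNat) 1 == 0) a htrue1 hfalse1 64 0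
      (by omega) (by omega)
    simpa using this
  -- second loop
  have htrue2 : ∀ t : Nat, t < e →
      (PySem.Int.band (mask >>> (((a : Int) + (t : Int))).toNat) 1 == 1) = true := by
    intro t ht
    have hc : ((a : Int) + (t : Int)).toNat = a + t := by omega
    rw [hc, hA2 t (by omega), pvBandCastOne]
    have hodd : (2^(e-t) * w - 1) % 2 = 1 := by
      have h2 : (2:Nat)^(e-t) = 2 * 2^(e-t-1) := by
        rw [← pow_succ']; congr 1; omega
      have h3 : 2^(e-t) * w = 2 * (2^(e-t-1) * w) := by rw [h2]; ring
      have h4 : 0 < 2^(e-t-1) * w := Nat.mul_pos (Nat.two_pow_pos _) (by omega)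
      omega
    rw [hodd]
    simp
  have hfalse2 : (PySem.Int.band (mask >>> (((a : Int) + (e : Int))).toNat) 1 == 1) = false := by
    have hc : ((a : Int) + (e : Int)).toNat = a + e := by omega
    rw [hc, hA2 e le_rfl, pvBandCastOne]
    have hev : (2^(e-e) * w - 1) % 2 = 0 := by simp; omega
    rw [hev]
    simp
  have hsize : pvWhileInc (fun t => PySem.Int.band (mask >>> ((a : Int) + t).toNat) 1 == 1) 64 0 = (e : Int) := by
    have := pvWhileInc_eq (fun t => PySem.Int.band (mask >>> ((a : Int) + t).toNat) 1 == 1) e htrue2 hfalse2 64 0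
      (by omega) (by omega)
    simpa using this
  constructor
  · simp only [get_shift_and_size, h0, Bool.false_eq_true, if_false]
    rw [hshift, hsize]
  · -- B side
    have hband : PySem.Int.band mask (-mask) = ((2^a : Nat) : Int) := by
      have hnn : 0 ≤ mask := by rw [hmask]; positivity
      have hneg : ¬ 0 ≤ -mask := by
        rw [hmask]
        have h5 : (0:Int) < ((2^a * M : Nat) : Int) := by exact_mod_cast hNpos
        omega
      simp only [PySem.Int.band, if_pos hnn, if_neg hneg]
      have h1 : mask.toNat = 2^a * M := by rw [hmask]; omega
      have h2 : (-(-mask) - 1).toNat = 2^a * M - 1 := by rw [hmask]; omega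
      rw [h1, h2, pvLandLow a M hM]
      have h3 : 2^a * M - 2^a * (M - 1) = 2^a := by
        have := Nat.mul_sub (2^a) M (M - 1)
        have h4 : M - (M - 1) = 1 := by omega
        rw [h4, Nat.mul_one] at this
        omega
      rw [h3]
  -- bit lengths
    have hbl : PySem.Int.bitLength (((2^a : Nat) : Int)) = a + 1 := by
      apply pvBitLengthEq
      · simp
      · simp [pow_succ]
    have hm : mask >>> ((a + 1) - 1 : Nat) = ((M : Nat) : Int) := by
      have := hA1 a le_rfl
      simpa using this
    have hbx : PySem.Int.bxor ((M : Nat) : Int) (((M : Nat) : Int) + 1) = ((2^(e+1) - 1 : Nat) : Int) := by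
      have hc : ((M : Nat) : Int) + 1 = ((M + 1 : Nat) : Int) := by push_cast; ring
      rw [hc, PySem.Int.bxor_natCast]
      congr 1
      rw [Nat.xor_comm, hMe, show M = 2^e * w - 1 by omega]
      exact pvXorLow e w hw
    have hbl2 : PySem.Int.bitLength (((2^(e+1) - 1 : Nat) : Int)) = e + 1 := by
      have h5 : ((2^(e+1) - 1 : Nat) : Int).natAbs = 2^(e+1) - 1 := Int.natAbs_natCast _
      have hp : (2:Nat)^(e+1) = 2^e * 2 := pow_succ 2 e
      have hq := Nat.two_pow_pos e
      apply pvBitLengthEq <;> rw [h5] <;> omega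
    simp only [get_shift_and_size_alt, h0, Bool.false_eq_true, if_false]
    rw [hband, hbl, hm, hbx, hbl2]
    simp

lemma pvNegShr (n k : Nat) : (Int.negSucc n) >>> k = Int.negSucc (n >>> k) := rfl

lemma pvBandNegOneEven (q : Nat) (h : (q + 1) % 2 = 0) :
    PySem.Int.band (Int.negSucc q) 1 = 0 := by
  rw [PySem.Int.band_one, PySem.Int.mod_eq_emod_of_pos (by norm_num), Int.negSucc_eq]
  omega

lemma pvBandNegOneOdd (q : Nat) (h : (q + 1) % 2 = 1) :
    PySem.Int.band (Int.negSucc q) 1 = 1 := by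
  rw [PySem.Int.band_one, PySem.Int.mod_eq_emod_of_pos (by norm_num), Int.negSucc_eq]
  omega

lemma pvMainNeg (mask : Int) (a e M w : Nat)
    (hM : M % 2 = 1) (hmask : mask = Int.negSucc (2^a * M - 1))
    (hMe : M - 1 = 2^e * w) (hw : w % 2 = 1) (he : 1 ≤ e)
    (ha : a < 64) (hee : e < 64) :
    get_shift_and_size mask = ((a : Int), (e : Int)) ∧
    get_shift_and_size_alt mask = ((a : Int), (e : Int)) := by
  have hw1 : 1 ≤ w := by omega
  have hpe := Nat.two_pow_pos e
  have hM3 : 3 ≤ M := by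
    have h1 : 2 ≤ 2^e := by
      have : (2:Nat)^1 ≤ 2^e := Nat.pow_le_pow_right (by norm_num) he
      simpa using this
    have h2 : 2^e ≤ 2^e * w := Nat.le_mul_of_pos_right _ (by omega)
    omega
  have hpa := Nat.two_pow_pos a
  have hNpos : 0 < 2^a * M := Nat.mul_pos hpa (by omega)
  have h0 : (mask == 0) = false := by rw [hmask]; simp
  -- values of mask >> t for t ≤ a
  have hA1 : ∀ t : Nat, t ≤ a → mask >>> t = Int.negSucc (2^(a-t) * M - 1) := by
    intro t ht
    rw [hmask, pvNegShr, Nat.shiftRight_eq_div_pow]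
    congr 1
    have h2 : (2:Nat)^a * M = 2^t * (2^(a-t) * M) := by
      rw [← mul_assoc, ← pow_add]; congr 2; omega
    rw [h2, pvDivPow t _ (Nat.mul_pos (Nat.two_pow_pos _) (by omega))]
  -- values of mask >> (a + t) for t ≤ e
  have hA2 : ∀ t : Nat, t ≤ e → mask >>> (a + t) = Int.negSucc (2^(e-t) * w) := by
    intro t ht
    rw [hmask, pvNegShr, Nat.shiftRight_eq_div_pow]
    congr 1
    have hsplit : (2:Nat)^(a+t) = 2^a * 2^t := by rw [pow_add]
    have h1 : 2^a * M - 1 = 2^a * M - 1 := rfl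
    have h2 : (2^a * M - 1) / 2^(a+t) = (M - 1) / 2^t := by
      rw [hsplit, ← Nat.div_div_eq_div_mul]
      congr 1
      have h3 : (2:Nat)^a * M = 2^a * M := rfl
      rw [pvDivPow a M (by omega)]
    rw [h2, hMe, pvPowMulDiv t e w ht]
  -- first loop
  have htrue1 : ∀ t : Nat, t < a →
      (PySem.Int.band (mask >>> ((t : Int)).toNat) 1 == 0) = true := by
    intro t ht
    rw [Int.toNat_natCast, hA1 t (by omega)]
    have hev : (2^(a-t) * M - 1 + 1) % 2 = 0 := by
      have h2 : (2:Nat)^(a-t) = 2 * 2^(a-t-1) := by rw [← pow_succ']; congr 1; omega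
      have h3 : 2^(a-t) * M = 2 * (2^(a-t-1) * M) := by rw [h2]; ring
      have h4 : 0 < 2^(a-t-1) * M := Nat.mul_pos (Nat.two_pow_pos _) (by omega)
      omega
    rw [pvBandNegOneEven _ hev]
    simp
  have hfalse1 : (PySem.Int.band (mask >>> ((a : Int)).toNat) 1 == 0) = false := by
    rw [Int.toNat_natCast, hA1 a le_rfl]
    have hodd : (2^(a-a) * M - 1 + 1) % 2 = 1 := by simp; omega
    rw [pvBandNegOneOdd _ hodd]
    simp
  have hshift : pvWhileInc (fun s => PySem.Int.band (mask >>> s.toNat) 1 == 0) 64 0 = (a : Int) := by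
    have := pvWhileInc_eq (fun s => PySem.Int.band (mask >>> s.toNat) 1 == 0) a htrue1 hfalse1 64 0
      (by omega) (by omega)
    simpa using this
  -- second loop
  have htrue2 : ∀ t : Nat, t < e →
      (PySem.Int.band (mask >>> (((a : Int) + (t : Int))).toNat) 1 == 1) = true := by
    intro t ht
    have hc : ((a : Int) + (t : Int)).toNat = a + t := by omega
    rw [hc, hA2 t (by omega)]
    have hodd : (2^(e-t) * w + 1) % 2 = 1 := by
      have h2 : (2:Nat)^(e-t) = 2 * 2^(e-t-1) := by rw [← pow_succ']; congr 1; omega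
      have h3 : 2^(e-t) * w = 2 * (2^(e-t-1) * w) := by rw [h2]; ring
      omega
    rw [pvBandNegOneOdd _ hodd]
    simp
  have hfalse2 : (PySem.Int.band (mask >>> (((a : Int) + (e : Int))).toNat) 1 == 1) = false := by
    have hc : ((a : Int) + (e : Int)).toNat = a + e := by omega
    rw [hc, hA2 e le_rfl]
    have hev : (2^(e-e) * w + 1) % 2 = 0 := by simp; omega
    rw [pvBandNegOneEven _ hev]
    simp
  have hsize : pvWhileInc (fun t => PySem.Int.band (mask >>> ((a : Int) + t).toNat) 1 == 1) 64 0 = (e : Int) := by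
    have := pvWhileInc_eq (fun t => PySem.Int.band (mask >>> ((a : Int) + t).toNat) 1 == 1) e htrue2 hfalse2 64 0
      (by omega) (by omega)
    simpa using this
  constructor
  · simp only [get_shift_and_size, h0, Bool.false_eq_true, if_false]
    rw [hshift, hsize]
  · -- B side
    have hnegmask : -mask = ((2^a * M : Nat) : Int) := by
      rw [hmask, Int.negSucc_eq]
      omega
    have hband : PySem.Int.band mask (-mask) = ((2^a : Nat) : Int) := by
      have hlt : ¬ 0 ≤ mask := by rw [hmask, Int.negSucc_eq]; omega
      have hge : 0 ≤ -mask := by rw [hnegmask]; positivity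
      simp only [PySem.Int.band, if_neg hlt, if_pos hge]
      have h1 : (-mask).toNat = 2^a * M := by rw [hnegmask]; omega
      have h2 : (-mask - 1).toNat = 2^a * M - 1 := by rw [hnegmask]; omega
      rw [h1, h2, pvLandLow a M hM]
      have h3 : 2^a * M - 2^a * (M - 1) = 2^a := by
        have := Nat.mul_sub (2^a) M (M - 1)
        have h4 : M - (M - 1) = 1 := by omega
        rw [h4, Nat.mul_one] at this
        omega
      rw [h3]
    have hbl : PySem.Int.bitLength (((2^a : Nat) : Int)) = a + 1 := by
      apply pvBitLengthEq
      · simp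
      · simp [pow_succ]
    have hm : mask >>> ((a + 1) - 1 : Nat) = Int.negSucc (M - 1) := by
      have := hA1 a le_rfl
      simpa using this
    have hbx : PySem.Int.bxor (Int.negSucc (M - 1)) (Int.negSucc (M - 1) + 1)
        = ((2^(e+1) - 1 : Nat) : Int) := by
      have hsucc : Int.negSucc (M - 1) + 1 = Int.negSucc (M - 2) := by
        rw [Int.negSucc_eq, Int.negSucc_eq]; omega
      rw [hsucc]
      have hlt1 : ¬ 0 ≤ Int.negSucc (M - 1) := by rw [Int.negSucc_eq]; omega
      have hlt2 : ¬ 0 ≤ Int.negSucc (M - 2) := by rw [Int.negSucc_eq]; omega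
      simp only [PySem.Int.bxor, if_neg hlt1, if_neg hlt2]
      have h1 : (-Int.negSucc (M - 1) - 1).toNat = M - 1 := by rw [Int.negSucc_eq]; omega
      have h2 : (-Int.negSucc (M - 2) - 1).toNat = M - 2 := by rw [Int.negSucc_eq]; omega
      rw [h1, h2]
      congr 1
      have h4 : M - 2 = 2^e * w - 1 := by omega
      rw [h4, hMe, pvXorLow e w hw]
    have hbl2 : PySem.Int.bitLength (((2^(e+1) - 1 : Nat) : Int)) = e + 1 := by
      have h5 : ((2^(e+1) - 1 : Nat) : Int).natAbs = 2^(e+1) - 1 := Int.natAbs_natCast _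
      have hp : (2:Nat)^(e+1) = 2^e * 2 := pow_succ 2 e
      apply pvBitLengthEq <;> rw [h5] <;> omega
    simp only [get_shift_and_size_alt, h0, Bool.false_eq_true, if_false]
    rw [hband, hbl, hm, hbx, hbl2]
    simp

lemma pvPowBound (a : Nat) (h : 2^a ≤ 2147483649) : a < 64 := by
  by_contra h2
  have h3 := Nat.pow_le_pow_right (show 1 ≤ 2 by norm_num) (show 64 ≤ a by omega)
  have h4 : (2:Nat)^64 = 18446744073709551616 := by norm_num
  omega

-- the two ports agree on every in-domain input admitted by Pre_
lemma pvFinal : ∀ (mask : Int),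
    (-2147483648 ≤ mask ∧ mask ≤ 2147483648) →
    (0 ≤ mask ∨ PySem.Int.band (-mask) (-mask - 1) ≠ 0) →
    get_shift_and_size mask = get_shift_and_size_alt mask := by
  intro mask hdom hpre
  by_cases hz : mask = 0
  · subst hz; rfl
  by_cases hpos : 0 < mask
  · -- positive
    have hN0 : mask.toNat ≠ 0 := by omega
    obtain ⟨a, M, hModd, hNdec⟩ := Nat.exists_eq_two_pow_mul_odd hN0
    have hM : M % 2 = 1 := Nat.odd_iff.mp hModd
    obtain ⟨e, w, hwodd, hMe⟩ := Nat.exists_eq_two_pow_mul_odd (n := M + 1) (by omega)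
    have hw : w % 2 = 1 := Nat.odd_iff.mp hwodd
    have he : 1 ≤ e := by
      by_contra h
      have h1 : e = 0 := by omega
      rw [h1, pow_zero, one_mul] at hMe
      omega
    have hmask : mask = (((2^a * M : Nat)) : Int) := by rw [← hNdec]; omega
    have hNle : mask.toNat ≤ 2147483648 := by omega
    have hpa : 2^a ≤ 2^a * M := Nat.le_mul_of_pos_right _ (by omega)
    have hpe : 2^e ≤ 2^e * w := Nat.le_mul_of_pos_right _ (by omega)
    have hMle : M ≤ mask.toNat := hNdec ▸ Nat.le_mul_of_pos_left M (Nat.two_pow_pos a)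
    have ha : a < 64 := pvPowBound a (by omega)
    have hee : e < 64 := pvPowBound e (by omega)
    obtain ⟨hA, hB⟩ := pvMainPos mask a e M w hM hmask hMe hw he ha hee
    rw [hA, hB]
  · -- negative
    have hneg : mask < 0 := by omega
    have hN0 : (-mask).toNat ≠ 0 := by omega
    obtain ⟨a, M, hModd, hNdec⟩ := Nat.exists_eq_two_pow_mul_odd hN0
    have hM : M % 2 = 1 := Nat.odd_iff.mp hModd
    have hcast : -mask = (((2^a * M : Nat)) : Int) := by rw [← hNdec]; omega
    have hpre2 : PySem.Int.band (-mask) (-mask - 1) ≠ 0 := by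
      rcases hpre with h | h
      · omega
      · exact h
    have hMpos : 0 < M := by omega
    have hM1 : M ≠ 1 := by
      intro h1
      subst h1
      rw [mul_one] at hcast
      have hc1 : -mask - 1 = (((2^a - 1 : Nat)) : Int) := by
        have := Nat.two_pow_pos a
        omega
      rw [hc1, hcast, PySem.Int.band_natCast] at hpre2
      have h2 : (2^a) &&& (2^a - 1) = 0 := by
        have h3 := pvLandLow a 1 (by norm_num)
        simpa using h3
      rw [h2] at hpre2
      simp at hpre2
    have hM3 : 3 ≤ M := by omega
    obtain ⟨e, w, hwodd, hMe⟩ := Nat.exists_eq_two_pow_mul_odd (n := M - 1) (by omega)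
    have hw : w % 2 = 1 := Nat.odd_iff.mp hwodd
    have he : 1 ≤ e := by
      by_contra h
      have h1 : e = 0 := by omega
      rw [h1, pow_zero, one_mul] at hMe
      omega
    have hmask : mask = Int.negSucc (2^a * M - 1) := by
      rw [Int.negSucc_eq]
      have := Nat.mul_pos (Nat.two_pow_pos a) hMpos
      omega
    have hNle : (-mask).toNat ≤ 2147483648 := by omega
    have hpa : 2^a ≤ 2^a * M := Nat.le_mul_of_pos_right _ (by omega)
    have hpe : 2^e ≤ 2^e * w := Nat.le_mul_of_pos_right _ (by omega)
    have hMle : M ≤ (-mask).toNat := hNdec ▸ Nat.le_mul_of_pos_left M (Nat.two_pow_pos a)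
    have ha : a < 64 := pvPowBound a (by omega)
    have hee : e < 64 := pvPowBound e (by omega)
    obtain ⟨hA, hB⟩ := pvMainNeg mask a e M w hM hmask hMe hw he ha hee
    rw [hA, hB]

-- ===== VERDICT (by name: the statement is the Claim_ definition above) =====
theorem get_shift_and_size_spec : Claim_equal_get_shift_and_size := by
  intro mask hdom hpre
  unfold Spec_get_shift_and_size
  unfold Dom_get_shift_and_size pvDomInt at hdom
  unfold Pre_get_shift_and_size at hpre
  exact pvFinal mask (by simpa using hdom) hpre
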